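-- pv_equiv track=rewrite | github.com/tgd1975/PartsLedger | src/partsledger/inventory/family.py | _common_alnum_prefix
-- ===== SOURCE A (Python) =====
-- def _common_alnum_prefix(a: str, b: str) -> str:
--     out: list[str] = []
--     for ca, cb in zip(a, b):
--         if ca == cb and ca.isalnum():
--             out.append(ca)
--         else:
--             break
--     return "".join(out)
-- ===== SOURCE B (Python) =====
-- def _common_alnum_prefix(a: str, b: str) -> str:
--     # Two-pass: plain common prefix first, then truncate at first non-alnum.
--     n = min(len(a), len(b))
--     i = 0
--     while i < n and a[i] == b[i]:
--         i += 1
--     p = a[:i]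
--     j = 0
--     while j < len(p) and p[j].isalnum():
--         j += 1
--     return p[:j]
-- ===== Notes on version B (the rewrite author's own statement) =====
-- stated objective: alternative
-- what changed: Replaced the single fused scan (zip with combined equality-and-isalnum break) by a two-pass computation: first the plain common-prefix length, then truncation of that prefix at its first non-alphanumeric character.
import Mathlib
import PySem

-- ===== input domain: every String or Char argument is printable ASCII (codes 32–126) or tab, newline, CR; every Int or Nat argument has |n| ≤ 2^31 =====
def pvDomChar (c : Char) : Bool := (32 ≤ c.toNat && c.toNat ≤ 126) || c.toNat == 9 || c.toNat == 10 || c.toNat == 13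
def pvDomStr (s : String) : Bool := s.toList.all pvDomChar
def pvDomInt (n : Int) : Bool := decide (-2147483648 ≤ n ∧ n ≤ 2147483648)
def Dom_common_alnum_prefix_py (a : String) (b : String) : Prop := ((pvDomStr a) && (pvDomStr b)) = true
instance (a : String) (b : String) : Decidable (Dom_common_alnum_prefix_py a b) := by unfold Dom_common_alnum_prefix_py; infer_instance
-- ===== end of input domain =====

-- B replaces A's single fused zip-scan-with-break by a two-pass computation (common-prefix
-- length, then truncation at the first non-alphanumeric character); same cost, alternative shape.

-- ===== PORT A =====
-- A's loop over zip(a,b) with break, appending to out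
def pvGoA : List (Char × Char) → List Char
  | [] => []
  | (ca, cb) :: rest =>
      if ca == cb && PySem.Chars.isalnum ca then ca :: pvGoA rest else []

def common_alnum_prefix_py (a : String) (b : String) : String :=
  String.mk (pvGoA (a.toList.zip b.toList))

-- ===== PORT B =====
-- first while loop of Source B: i < n and a[i] == b[i]  (parallel recursion = the index walk)
def pvEqLen : List Char → List Char → Nat
  | x :: xs, y :: ys => if x == y then pvEqLen xs ys + 1 else 0
  | _, _ => 0

-- second while loop of Source B: j < len(p) and p[j].isalnum()
def pvAlnumLen : List Char → Nat
  | [] => 0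
  | c :: cs => if PySem.Chars.isalnum c then pvAlnumLen cs + 1 else 0

def common_alnum_prefix_py_alt (a : String) (b : String) : String :=
  let i := pvEqLen a.toList b.toList
  let p := a.toList.take i      -- a[:i], i ≥ 0
  let j := pvAlnumLen p
  String.mk (p.take j)          -- p[:j], j ≥ 0

-- ===== PRECONDITION & SPEC =====
def Spec_common_alnum_prefix_py (a : String) (b : String) (out : String) : Prop := out = common_alnum_prefix_py_alt a b
instance (a : String) (b : String) (out : String) : Decidable (Spec_common_alnum_prefix_py a b out) := by unfold Spec_common_alnum_prefix_py; infer_instance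

-- ===== CLAIM (what is proved, stated in full; the proofs are below) =====
def Claim_equal_common_alnum_prefix_py : Prop := ∀ (a : String) (b : String), Dom_common_alnum_prefix_py a b → Spec_common_alnum_prefix_py a b (common_alnum_prefix_py a b)

-- ===== LEMMAS AND PROOFS =====
theorem pvGoA_eq (xs ys : List Char) :
    pvGoA (xs.zip ys) =
      (xs.take (pvEqLen xs ys)).take (pvAlnumLen (xs.take (pvEqLen xs ys))) := by
  induction xs generalizing ys with
  | nil => simp [pvGoA, pvEqLen]
  | cons x xs ih =>
    cases ys with
    | nil => simp [pvGoA, pvEqLen]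
    | cons y ys =>
      by_cases hxy : x == y
      · by_cases hal : PySem.Chars.isalnum x
        · simp [pvGoA, pvEqLen, pvAlnumLen, hxy, hal, ih ys]
        · simp [pvGoA, pvEqLen, pvAlnumLen, hxy, hal]
      · simp [pvGoA, pvEqLen, hxy]

-- ===== VERDICT (by name: the statement is the Claim_ definition above) =====
theorem common_alnum_prefix_py_spec : Claim_equal_common_alnum_prefix_py := by
  intro a b _
  unfold Spec_common_alnum_prefix_py common_alnum_prefix_py common_alnum_prefix_py_alt
  rw [pvGoA_eq]
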